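-- pv_equiv track=rewrite | github.com/pvishalkeerthan/weave | weave/ops_primitives/list_.py | _all_join_keys_mapping
-- ===== SOURCE A (Python) =====
-- import typing
--
-- def _all_join_keys_mapping(
--     arrs: list[list[dict]], join_keys: list[list[typing.Any]]
-- ) -> typing.Tuple[set[typing.Any], list[dict[typing.Any, list[typing.Any]]]]:
--     all_join_keys: set[typing.Any] = set([])
--     join_key_mapping = []
--     for arr, keys in zip(arrs, join_keys):
--         arr_map: dict = {}
--         for k, v in zip(keys, arr):
--             if k != None:
--                 all_join_keys.add(k)
--                 if k in arr_map:
--                     arr_map[k].append(v)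
--                 else:
--                     arr_map[k] = [v]
--         join_key_mapping.append(arr_map)
--     return all_join_keys, join_key_mapping
-- ===== SOURCE B (Python) =====
-- def _all_join_keys_mapping(arrs, join_keys):
--     # per-key grouping: for each array, first dedupe the keys (first-occurrence
--     # order), then build the map by one filtering comprehension per distinct key
--     all_join_keys = set()
--     join_key_mapping = []
--     for arr, keys in zip(arrs, join_keys):
--         pairs = list(zip(keys, arr))
--         seen = list(dict.fromkeys(k for k, _ in pairs if k != None))
--         join_key_mapping.append({k: [v for k2, v in pairs if k2 == k] for k in seen})
--         all_join_keys.update(seen)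
--     return all_join_keys, join_key_mapping
-- ===== Notes on version B (the rewrite author's own statement) =====
-- stated objective: alternative
-- what changed: A groups incrementally, threading a dict per array (membership branch, append-or-create) and fusing the key-set accumulation into the same loop; B first dedupes each array's keys (dict.fromkeys) and then builds each map by one filtering comprehension per distinct key, updating the key set from the deduped list.
import Mathlib
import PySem

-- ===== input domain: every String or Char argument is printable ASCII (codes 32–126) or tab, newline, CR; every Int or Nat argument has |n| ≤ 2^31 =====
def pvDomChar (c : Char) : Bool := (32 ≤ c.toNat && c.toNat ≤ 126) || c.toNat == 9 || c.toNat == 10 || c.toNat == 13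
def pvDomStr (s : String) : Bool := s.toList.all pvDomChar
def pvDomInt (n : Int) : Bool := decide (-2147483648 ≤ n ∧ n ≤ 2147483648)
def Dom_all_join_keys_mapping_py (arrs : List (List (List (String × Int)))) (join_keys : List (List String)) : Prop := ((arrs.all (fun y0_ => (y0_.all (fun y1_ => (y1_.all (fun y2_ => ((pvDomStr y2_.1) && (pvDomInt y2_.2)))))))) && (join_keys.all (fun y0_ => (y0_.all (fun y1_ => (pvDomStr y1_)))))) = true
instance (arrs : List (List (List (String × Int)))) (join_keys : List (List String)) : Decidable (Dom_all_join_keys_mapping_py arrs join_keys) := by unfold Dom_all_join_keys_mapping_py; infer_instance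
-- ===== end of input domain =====

-- B replaces A's fused incremental dict build by per-key grouping: dedupe each
-- array's keys first, then one filtering pass per distinct key (alternative
-- decomposition, same return value).

-- ===== PORT A =====
-- Note on `if k != None:` — the keys are Strings here (type convention), and in Python a
-- str never equals None, so the guard is always True on this domain; the port keeps the body.
def all_join_keys_mapping_py (arrs : List (List (List (String × Int)))) (join_keys : List (List String)) : List String × (List (List (String × List (List (String × Int))))) :=
  let res := (List.zip arrs join_keys).foldl
    (fun st p =>
      -- p.1 = arr, p.2 = keys; the inner loop carries (all_join_keys, arr_map)
      let inner := (List.zip p.2 p.1).foldl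
        (fun sm kv =>
          (PySem.Set.add sm.1 kv.1,                                    -- all_join_keys.add(k)
           if sm.2.contains kv.1 then                                  -- if k in arr_map:
             sm.2.insert kv.1 (sm.2.getD kv.1 [] ++ [kv.2])            --   arr_map[k].append(v)
           else
             sm.2.insert kv.1 [kv.2]))                                 -- else: arr_map[k] = [v]
        (st.1, (PySem.Dict.empty : PySem.Dict String (List (List (String × Int)))))
      (inner.1, st.2 ++ [inner.2]))                                    -- join_key_mapping.append(arr_map)
    ((PySem.Set.ofList [] : PySem.Set String), ([] : List (PySem.Dict String (List (List (String × Int))))))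
  (res.1, res.2.map (fun m => m.items))

-- ===== PORT B =====
-- `if k != None` drops nothing on String keys; a dict comprehension over the distinct
-- keys `seen` is the association list seen.map (k, values-filtered-for-k).
def all_join_keys_mapping_py_alt (arrs : List (List (List (String × Int)))) (join_keys : List (List String)) : List String × (List (List (String × List (List (String × Int))))) :=
  (List.zip arrs join_keys).foldl
    (fun st p =>
      let pairs := List.zip p.2 p.1                                    -- pairs = list(zip(keys, arr))
      let seen := PySem.List.dedup (pairs.map (fun kv => kv.1))        -- list(dict.fromkeys(k for k, _ in pairs if k != None))
      (PySem.Set.update st.1 seen,                                     -- all_join_keys.update(seen)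
       st.2 ++ [seen.map (fun k =>                                     -- {k: [v for k2, v in pairs if k2 == k] for k in seen}
         (k, (pairs.filter (fun kv => kv.1 == k)).map (fun kv => kv.2)))]))
    ((PySem.Set.empty : PySem.Set String), [])

-- ===== PRECONDITION & SPEC =====
def Spec_all_join_keys_mapping_py (arrs : List (List (List (String × Int)))) (join_keys : List (List String)) (out : List String × (List (List (String × List (List (String × Int)))))) : Prop := out = all_join_keys_mapping_py_alt arrs join_keys
instance (arrs : List (List (List (String × Int)))) (join_keys : List (List String)) (out : List String × (List (List (String × List (List (String × Int)))))) : Decidable (Spec_all_join_keys_mapping_py arrs join_keys out) := by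
  unfold Spec_all_join_keys_mapping_py
  -- staged letI's keep each instance search small (one-shot synthesis of the nested DecidableEq blows the default search budget)
  letI d1 : DecidableEq (List (List (String × Int))) := inferInstance
  letI d2 : DecidableEq (String × List (List (String × Int))) := inferInstance
  letI d3 : DecidableEq (List (String × List (List (String × Int)))) := inferInstance
  letI d4 : DecidableEq (List (List (String × List (List (String × Int))))) := inferInstance
  infer_instance

-- ===== CLAIM (what is proved, stated in full; the proofs are below) =====
def Claim_equal_all_join_keys_mapping_py : Prop := ∀ (arrs : List (List (List (String × Int)))) (join_keys : List (List String)), Dom_all_join_keys_mapping_py arrs join_keys → Spec_all_join_keys_mapping_py arrs join_keys (all_join_keys_mapping_py arrs join_keys)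

-- ===== LEMMAS AND PROOFS =====

-- A's dict-building branch is exactly a `modify` (append-at-key) step
theorem pvStep_eq (m : PySem.Dict String (List (List (String × Int)))) (kv : String × List (String × Int)) :
    (if m.contains kv.1 then m.insert kv.1 (m.getD kv.1 [] ++ [kv.2]) else m.insert kv.1 [kv.2])
      = m.modify kv.1 [] (fun l => l ++ [kv.2]) := by
  by_cases h : m.contains kv.1 = true
  · simp [h, PySem.Dict.modify]
  · have h0 : m.get? kv.1 = none :=
      (PySem.Dict.get?_eq_none_iff_contains m kv.1).mpr (by simpa using h)
    simp [h, h0, PySem.Dict.modify, PySem.Dict.getD]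

-- membership is preserved along an add-fold (both from the seed and from the list)
theorem pvMem_foldl_add_of_mem_seed {s : PySem.Set String} {x : String} (l : List String)
    (h : x ∈ s) : x ∈ List.foldl PySem.Set.add s l := by
  induction l generalizing s with
  | nil => exact h
  | cons a l ih => exact ih ((PySem.Set.mem_add s a x).mpr (Or.inl h))

theorem pvMem_foldl_add_of_mem {s : PySem.Set String} {x : String} {l : List String}
    (h : x ∈ l) : x ∈ List.foldl PySem.Set.add s l := by
  induction l generalizing s with
  | nil => cases h
  | cons a l ih =>
    rcases List.mem_cons.mp h with rfl | h
    · exact pvMem_foldl_add_of_mem_seed l ((PySem.Set.mem_add s x x).mpr (Or.inr rfl))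
    · exact ih h

-- adding a pre-deduplicated list is the same as adding the raw list
theorem pvAdd_shuffle (l : List String) (s acc : PySem.Set String) :
    List.foldl PySem.Set.add s (List.foldl PySem.Set.add acc l)
      = List.foldl PySem.Set.add (List.foldl PySem.Set.add s acc) l := by
  induction l generalizing acc with
  | nil => rfl
  | cons k l ih =>
    rw [List.foldl_cons, List.foldl_cons]
    by_cases h : k ∈ acc
    · rw [PySem.Set.add_of_mem h, PySem.Set.add_of_mem (pvMem_foldl_add_of_mem h), ih]
    · rw [PySem.Set.add_of_not_mem h, ih (acc ++ [k])]
      simp [List.foldl_append]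

theorem pvFoldl_add_ofList (l : List String) (s : PySem.Set String) :
    List.foldl PySem.Set.add s (PySem.Set.ofList l) = List.foldl PySem.Set.add s l := by
  rw [PySem.Set.ofList_eq_foldl, pvAdd_shuffle]
  rfl

-- the modify-fold's items are: deduped keys, each paired with its filtered values
theorem pvInner_items (pairs : List (String × List (String × Int))) :
    (pairs.foldl (fun m kv => m.modify kv.1 [] (fun l => l ++ [kv.2]))
        (PySem.Dict.empty : PySem.Dict String (List (List (String × Int))))).items
      = (PySem.Set.ofList (pairs.map (fun kv => kv.1))).map
          (fun k => (k, (pairs.filter (fun kv => kv.1 == k)).map (fun kv => kv.2))) := by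
  have hnd : (pairs.foldl (fun m kv => m.modify kv.1 [] (fun l => l ++ [kv.2]))
      (PySem.Dict.empty : PySem.Dict String (List (List (String × Int))))).keys.Nodup :=
    PySem.Dict.nodup_keys_foldl_modify_key pairs (fun kv => kv.1) []
      (fun _ kv => fun l => l ++ [kv.2]) PySem.Dict.empty (by simp [PySem.Dict.keys_empty])
  have hkeys : (pairs.foldl (fun m kv => m.modify kv.1 [] (fun l => l ++ [kv.2]))
      (PySem.Dict.empty : PySem.Dict String (List (List (String × Int))))).keys
      = PySem.Set.ofList (pairs.map (fun kv => kv.1)) := by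
    rw [PySem.Dict.keys_foldl_modify_key pairs (fun kv => kv.1) []
      (fun _ kv => fun l => l ++ [kv.2]) PySem.Dict.empty, PySem.Dict.keys_empty]
    rfl
  rw [PySem.Dict.items_eq_map_keys _ hnd [], hkeys]
  refine List.map_congr_left (fun k _ => ?_)
  rw [PySem.Dict.getD_foldl_modify_append pairs PySem.Dict.empty k,
    PySem.Dict.getD_empty, List.nil_append]

-- A's fused outer loop, piece by piece, equals B's per-key-grouping outer loop
theorem pvOuter_eq (l : List (List (List (String × Int)) × List String))
    (s : PySem.Set String) (acc : List (PySem.Dict String (List (List (String × Int))))) :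
    ((l.foldl (fun st p =>
        let inner := (List.zip p.2 p.1).foldl
          (fun sm kv =>
            (PySem.Set.add sm.1 kv.1,
             if sm.2.contains kv.1 then sm.2.insert kv.1 (sm.2.getD kv.1 [] ++ [kv.2])
             else sm.2.insert kv.1 [kv.2]))
          (st.1, (PySem.Dict.empty : PySem.Dict String (List (List (String × Int)))))
        (inner.1, st.2 ++ [inner.2])) (s, acc)).1,
     (l.foldl (fun st p =>
        let inner := (List.zip p.2 p.1).foldl
          (fun sm kv =>
            (PySem.Set.add sm.1 kv.1,
             if sm.2.contains kv.1 then sm.2.insert kv.1 (sm.2.getD kv.1 [] ++ [kv.2])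
             else sm.2.insert kv.1 [kv.2]))
          (st.1, (PySem.Dict.empty : PySem.Dict String (List (List (String × Int)))))
        (inner.1, st.2 ++ [inner.2])) (s, acc)).2.map (fun m => m.items))
      = l.foldl (fun st p =>
          let pairs := List.zip p.2 p.1
          let seen := PySem.List.dedup (pairs.map (fun kv => kv.1))
          (PySem.Set.update st.1 seen,
           st.2 ++ [seen.map (fun k =>
             (k, (pairs.filter (fun kv => kv.1 == k)).map (fun kv => kv.2)))]))
        (s, acc.map (fun m => m.items)) := by
  induction l generalizing s acc with
  | nil => rfl
  | cons p l ih =>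
    rw [List.foldl_cons, List.foldl_cons]
    -- split A's fused inner fold into its independent set and dict components
    rw [PySem.List.foldl_prod_mk (fun s kv => PySem.Set.add s kv.1)
      (fun (m : PySem.Dict String (List (List (String × Int)))) kv =>
        if m.contains kv.1 then m.insert kv.1 (m.getD kv.1 [] ++ [kv.2])
        else m.insert kv.1 [kv.2]) (List.zip p.2 p.1) s PySem.Dict.empty]
    -- the dict component is the modify-fold
    have hdict : (List.zip p.2 p.1).foldl
        (fun (m : PySem.Dict String (List (List (String × Int)))) kv =>
          if m.contains kv.1 then m.insert kv.1 (m.getD kv.1 [] ++ [kv.2])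
          else m.insert kv.1 [kv.2]) PySem.Dict.empty
        = (List.zip p.2 p.1).foldl
            (fun m kv => m.modify kv.1 [] (fun l => l ++ [kv.2])) PySem.Dict.empty := by
      exact List.foldl_ext _ _ _ (fun m kv _ => pvStep_eq m kv)
    -- the set component is B's Set.update with the deduped keys
    have hset : (List.zip p.2 p.1).foldl (fun s kv => PySem.Set.add s kv.1) s
        = PySem.Set.update s (PySem.List.dedup ((List.zip p.2 p.1).map (fun kv => kv.1))) := by
      rw [PySem.List.dedup_eq_ofList]
      show _ = List.foldl PySem.Set.add s _
      rw [pvFoldl_add_ofList, ← List.foldl_map]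
    rw [ih, hdict, hset]
    simp only [List.map_append, List.map_cons, List.map_nil, pvInner_items,
      PySem.List.dedup_eq_ofList]

-- ===== VERDICT (by name: the statement is the Claim_ definition above) =====
theorem all_join_keys_mapping_py_spec : Claim_equal_all_join_keys_mapping_py := by
  intro arrs join_keys _
  unfold Spec_all_join_keys_mapping_py all_join_keys_mapping_py all_join_keys_mapping_py_alt
  exact pvOuter_eq (List.zip arrs join_keys) (PySem.Set.ofList []) []
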